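-- pv_equiv track=rewrite | github.com/Baiyu6666/CHMM | runners/run_param_search.py | _pick_metric_key
-- ===== SOURCE A (Python) =====
-- from typing import Any
--
-- def _pick_metric_key(rows: list[dict[str, Any]], preferred: list[str]) -> str | None:
--     if not rows:
--         return None
--     available = {str(key) for row in rows for key in row.get("metrics", {}).keys()}
--     for key in preferred:
--         if key in available:
--             return key
--     return None
-- ===== SOURCE B (Python) =====
-- def _pick_metric_key(rows: list[dict[str, object]], preferred: list[str]) -> str | None:
--     # Rank-minimization: map each preferred key to its first position, then make a
--     # single pass over all metric keys keeping the smallest rank seen; no search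
--     # over `preferred` for membership is performed at all.
--     rank = {}
--     for i, key in enumerate(preferred):
--         if key not in rank:
--             rank[key] = i
--     best = None
--     for row in rows:
--         for k in row.get("metrics", {}).keys():
--             r = rank.get(str(k))
--             if r is not None and (best is None or r < best):
--                 best = r
--     return preferred[best] if best is not None else None
-- ===== Notes on version B (the rewrite author's own statement) =====
-- stated objective: alternative
-- what changed: Replaces A's find-first-preferred-key-in-a-set search with rank minimization: build a first-occurrence position map of preferred, take one pass over all metric keys maintaining the minimum rank seen, and index preferred at that minimum; no search over preferred for a hit is performed.
import Mathlib
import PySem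

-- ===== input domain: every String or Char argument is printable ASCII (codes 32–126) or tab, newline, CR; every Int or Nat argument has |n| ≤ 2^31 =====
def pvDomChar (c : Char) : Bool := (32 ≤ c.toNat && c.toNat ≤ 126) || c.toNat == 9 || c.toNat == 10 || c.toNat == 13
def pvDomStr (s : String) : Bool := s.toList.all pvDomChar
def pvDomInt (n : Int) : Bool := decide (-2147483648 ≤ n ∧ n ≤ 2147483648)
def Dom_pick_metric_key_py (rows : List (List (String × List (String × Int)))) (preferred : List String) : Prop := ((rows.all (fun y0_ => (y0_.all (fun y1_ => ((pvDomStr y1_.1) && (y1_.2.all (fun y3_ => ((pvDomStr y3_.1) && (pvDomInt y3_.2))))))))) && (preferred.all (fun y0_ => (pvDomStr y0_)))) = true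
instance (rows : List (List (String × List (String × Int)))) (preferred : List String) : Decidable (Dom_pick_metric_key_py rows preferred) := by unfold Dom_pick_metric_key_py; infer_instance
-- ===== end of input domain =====

-- B replaces A's first-preferred-key-in-the-available-set search by rank minimization:
-- a first-occurrence position map of `preferred`, one pass over all metric keys keeping
-- the minimum rank, then `preferred[best]`; same result, different algorithm.

-- row.get("metrics", {}) : first-match lookup in the association list, default {} = []
def pvGetMetrics (row : List (String × List (String × Int))) : List (String × Int) :=
  ((row.find? (fun p => p.1 == "metrics")).map Prod.snd).getD []

-- ===== PORT A =====
-- 'for key in preferred: if key in available: return key' / 'return None'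
def pvPickLoopA (available : PySem.Set String) : List String → Option String
  | [] => none
  | k :: ks => if PySem.Set.contains available k then some k else pvPickLoopA available ks

def pick_metric_key_py (rows : List (List (String × List (String × Int)))) (preferred : List String) : Option String :=
  if rows = [] then none
  else
    -- {str(key) for row in rows for key in row.get("metrics", {}).keys()}; str() is identity on the String keys
    let available : PySem.Set String :=
      PySem.Set.ofList (rows.flatMap (fun row => (pvGetMetrics row).map Prod.fst))
    pvPickLoopA available preferred

-- ===== PORT B =====
-- 'for i, key in enumerate(preferred): if key not in rank: rank[key] = i'
def pvRankFold (d : PySem.Dict String Int) (l : List (Int × String)) : PySem.Dict String Int :=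
  l.foldl (fun d p => if d.contains p.2 then d else d.insert p.2 p.1) d

-- inner 'for k in row.get("metrics", {}).keys(): r = rank.get(str(k)); if …: best = r'
def pvBestStep (rank : PySem.Dict String Int) (best : Option Int) (k : String) : Option Int :=
  match PySem.Dict.get? rank k with
  | none => best
  | some r => match best with
              | none => some r
              | some b => if r < b then some r else some b

def pick_metric_key_py_alt (rows : List (List (String × List (String × Int)))) (preferred : List String) : Option String :=
  let rank := pvRankFold PySem.Dict.empty (PySem.List.enumerate preferred)
  let best := rows.foldl (fun best row =>
    (pvGetMetrics row).foldl (fun best p => pvBestStep rank best p.1) best) none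
  -- 'return preferred[best] if best is not None else None' (best is always a valid index)
  match best with
  | some b => PySem.List.pyGet? preferred b
  | none => none

-- ===== PRECONDITION & SPEC =====
def Spec_pick_metric_key_py (rows : List (List (String × List (String × Int)))) (preferred : List String) (out : Option String) : Prop := out = pick_metric_key_py_alt rows preferred
instance (rows : List (List (String × List (String × Int)))) (preferred : List String) (out : Option String) : Decidable (Spec_pick_metric_key_py rows preferred out) := by unfold Spec_pick_metric_key_py; infer_instance

-- ===== CLAIM (what is proved, stated in full; the proofs are below) =====
def Claim_equal_pick_metric_key_py : Prop := ∀ (rows : List (List (String × List (String × Int)))) (preferred : List String), Dom_pick_metric_key_py rows preferred → Spec_pick_metric_key_py rows preferred (pick_metric_key_py rows preferred)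

-- ===== LEMMAS AND PROOFS =====

-- the rank lookup function B's dict realises: first index of k in preferred, shifted by s
def pvIdx (ps : List String) (k : String) : Option Int :=
  (ps.findIdx? (fun m => m == k)).map Int.ofNat

theorem pvRankFold_get? (ps : List String) (s : Int) (d : PySem.Dict String Int) (k : String) :
    (pvRankFold d (PySem.List.enumerate ps s)).get? k
      = (d.get? k).or ((ps.findIdx? (fun m => m == k)).map (fun j => s + (j : Int))) := by
  induction ps generalizing s d with
  | nil => simp [pvRankFold, PySem.List.enumerate_nil]
  | cons p t ih =>
      rw [PySem.List.enumerate_cons]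
      show (pvRankFold (if d.contains p then d else d.insert p s) (PySem.List.enumerate t (s+1))).get? k = _
      rw [ih]
      by_cases hk : k = p
      · subst hk
        by_cases hc : d.contains k = true
        · rcases (PySem.Dict.contains_eq_isSome_get? d k ▸ hc : (d.get? k).isSome = true) |> Option.isSome_iff_exists.mp with ⟨v, hv⟩
          simp [hc, hv, List.findIdx?_cons]
        · have hnone : d.get? k = none := by
            rcases h : d.get? k with _ | v
            · rfl
            · exact absurd (by rw [PySem.Dict.contains_eq_isSome_get?, h]; rfl) hc
          simp [eq_false_of_ne_true hc, hnone, PySem.Dict.get?_insert_self, List.findIdx?_cons]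
      · have hget : (if d.contains p then d else d.insert p s).get? k = d.get? k := by
          split
          · rfl
          · exact PySem.Dict.get?_insert_of_ne d s hk
        rw [hget]
        have hpk : (p == k) = false := by simpa using (Ne.symm hk)
        rcases hd : d.get? k with _ | v
        · cases hfi : List.findIdx? (fun m => m == k) t with
          | none => simp [List.findIdx?_cons, hpk, hfi]
          | some j =>
              simp [List.findIdx?_cons, hpk, hfi]
              omega
        · rfl

theorem pvRank_get? (ps : List String) (k : String) :
    (pvRankFold PySem.Dict.empty (PySem.List.enumerate ps 0)).get? k = pvIdx ps k := by
  rw [pvRankFold_get?, pvIdx]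
  cases List.findIdx? (fun m => m == k) ps <;> simp

-- the nested best fold over rows flattens to a fold over the flat key list
theorem pvBest_flatten (rank : PySem.Dict String Int)
    (rows : List (List (String × List (String × Int)))) (acc : Option Int) :
    rows.foldl (fun best row => (pvGetMetrics row).foldl (fun best p => pvBestStep rank best p.1) best) acc
      = (rows.flatMap (fun row => (pvGetMetrics row).map Prod.fst)).foldl (pvBestStep rank) acc := by
  induction rows generalizing acc with
  | nil => rfl
  | cons r t ih => simp [List.flatMap_cons, List.foldl_append, List.foldl_map, ih]

-- the best fold is min? of the defined ranks
theorem pvBestStep_eq (g : String → Option Int) (best : Option Int) (k : String)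
    (rank : PySem.Dict String Int) (hg : ∀ k, rank.get? k = g k) :
    pvBestStep rank best k
      = match g k with
        | none => best
        | some r => match best with
                    | none => some r
                    | some b => some (min r b) := by
  rw [pvBestStep, hg]
  cases g k with
  | none => rfl
  | some r =>
      cases best with
      | none => rfl
      | some b => by_cases h : r < b <;> simp [h, min_def] <;> omega

theorem pvBestFold_eq_min? (rank : PySem.Dict String Int) (g : String → Option Int)
    (hg : ∀ k, rank.get? k = g k) (K : List String) :
    K.foldl (pvBestStep rank) none = (K.filterMap g).min? := by
  have step : ∀ best k, pvBestStep rank best k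
      = match g k with
        | none => best
        | some r => match best with | none => some r | some b => some (min r b) :=
    fun best k => pvBestStep_eq g best k rank hg
  have main : ∀ (K : List String) (acc : Option Int),
      K.foldl (pvBestStep rank) acc
        = match acc with
          | none => (K.filterMap g).min?
          | some a => some ((K.filterMap g).foldl min a) := by
    intro K
    induction K with
    | nil => intro acc; cases acc <;> rfl
    | cons k t ih =>
        intro acc
        rw [List.foldl_cons, step, List.filterMap_cons]
        cases hgk : g k with
        | none => exact ih acc
        | some r =>
            cases acc with
            | none =>
                rw [ih (some r)]
                simp [List.min?]
            | some a =>
                rw [ih (some (min r a))]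
                simp [List.foldl_cons, min_comm]
  simpa using main K none

-- min? commutes with the shift (· + 1)
theorem min?_map_add_one (L : List Int) :
    (L.map (fun r => r + 1)).min? = L.min?.map (fun r => r + 1) := by
  cases hm : L.min? with
  | none => rw [List.min?_eq_none_iff] at hm; subst hm; rfl
  | some m =>
      obtain ⟨hmem, hle⟩ := List.min?_eq_some_iff.mp hm
      rw [Option.map_some]
      apply List.min?_eq_some_iff.mpr
      refine ⟨List.mem_map_of_mem hmem, ?_⟩
      intro b hb
      rw [List.mem_map] at hb
      obtain ⟨a, ha, rfl⟩ := hb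
      have := hle a ha
      omega

theorem pvIdx_nonneg (ps : List String) (k : String) (b : Int) (h : pvIdx ps k = some b) : 0 ≤ b := by
  rw [pvIdx] at h
  rcases Option.map_eq_some_iff.mp h with ⟨n, _, rfl⟩
  exact Int.natCast_nonneg n

-- main equivalence on an arbitrary flat key list K
theorem pvMain (K : List String) (ps : List String) :
    pvPickLoopA (PySem.Set.ofList K) ps
      = match (K.filterMap (pvIdx ps)).min? with
        | some b => PySem.List.pyGet? ps b
        | none => none := by
  induction ps with
  | nil =>
      have : K.filterMap (pvIdx []) = [] := by
        simp [pvIdx, List.findIdx?_nil]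
      simp [pvPickLoopA, this]
  | cons p t ih =>
      rw [pvPickLoopA]
      by_cases hp : p ∈ K
      · -- p is available: A returns p; B's min is 0 and ps[0] = p
        have hcont : PySem.Set.contains (PySem.Set.ofList K) p = true := by
          rw [PySem.Set.contains_iff, PySem.Set.mem_ofList]; exact hp
        rw [hcont, if_pos rfl]
        have h0 : (0 : Int) ∈ K.filterMap (pvIdx (p :: t)) := by
          rw [List.mem_filterMap]
          exact ⟨p, hp, by simp [pvIdx, List.findIdx?_cons]⟩
        have hnonneg : ∀ b ∈ K.filterMap (pvIdx (p :: t)), (0 : Int) ≤ b := by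
          intro b hb
          rw [List.mem_filterMap] at hb
          obtain ⟨k, _, hk⟩ := hb
          exact pvIdx_nonneg _ _ _ hk
        rcases hmin : (K.filterMap (pvIdx (p :: t))).min? with _ | m
        · rw [List.min?_eq_none_iff] at hmin
          rw [hmin] at h0; exact absurd h0 (List.not_mem_nil)
        · obtain ⟨hmem, hle⟩ := List.min?_eq_some_iff.mp hmin
          have hm0 : m = 0 := le_antisymm (hle 0 h0) (hnonneg m hmem)
          subst hm0
          simp
      · -- p unavailable: every rank in p :: t is a t-rank shifted by one
        have hcont : PySem.Set.contains (PySem.Set.ofList K) p = false := by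
          rw [Bool.eq_false_iff]
          intro hc
          rw [PySem.Set.contains_iff, PySem.Set.mem_ofList] at hc
          exact hp hc
        rw [hcont, if_neg (by simp), ih]
        have hshift : K.filterMap (pvIdx (p :: t)) = (K.filterMap (pvIdx t)).map (fun r => r + 1) := by
          rw [List.map_filterMap]
          apply List.filterMap_congr
          intro k hk
          have hpk : (p == k) = false := by
            rcases eq_or_ne p k with rfl | hne
            · exact absurd hk hp
            · simpa using hne
          cases hfi : List.findIdx? (fun m => m == k) t with
          | none => simp [pvIdx, List.findIdx?_cons, hpk, hfi]
          | some j => simp [pvIdx, List.findIdx?_cons, hpk, hfi]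
        rw [hshift, min?_map_add_one]
        rcases hmin : (K.filterMap (pvIdx t)).min? with _ | m
        · rfl
        · have hmnn : (0 : Int) ≤ m := by
            have hmem := (List.min?_eq_some_iff.mp hmin).1
            rw [List.mem_filterMap] at hmem
            obtain ⟨k, _, hk⟩ := hmem
            exact pvIdx_nonneg _ _ _ hk
          have : PySem.List.pyGet? (p :: t) (m + 1) = PySem.List.pyGet? t m := by
            obtain ⟨n, rfl⟩ : ∃ n : Nat, (n : Int) = m := ⟨m.toNat, by omega⟩
            have h1 : ((n : Int) + 1) = ((n + 1 : Nat) : Int) := by push_cast; ring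
            rw [h1, PySem.List.pyGet?_natCast, PySem.List.pyGet?_natCast]
            rfl
          simp [this]

-- ===== VERDICT (by name: the statement is the Claim_ definition above) =====
theorem pick_metric_key_py_spec : Claim_equal_pick_metric_key_py := by
  intro rows preferred _
  show pick_metric_key_py rows preferred = pick_metric_key_py_alt rows preferred
  have hB : pick_metric_key_py_alt rows preferred
      = (match ((rows.flatMap (fun row => (pvGetMetrics row).map Prod.fst)).filterMap (pvIdx preferred)).min? with
         | some b => PySem.List.pyGet? preferred b
         | none => none) := by
    show (match rows.foldl (fun best row => (pvGetMetrics row).foldl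
            (fun best p => pvBestStep (pvRankFold PySem.Dict.empty (PySem.List.enumerate preferred 0)) best p.1) best) none with
          | some b => PySem.List.pyGet? preferred b
          | none => none) = _
    rw [pvBest_flatten, pvBestFold_eq_min? _ (pvIdx preferred) (pvRank_get? preferred)]
  rw [hB]
  by_cases h : rows = []
  · subst h; rfl
  · unfold pick_metric_key_py
    rw [if_neg h]
    exact pvMain _ preferred
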